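-- pv_equiv track=rewrite | github.com/Gawainus/hse | algo_ds_2/week4/min_union_cost.py | minUnionCost
-- ===== SOURCE A (Python) =====
-- def minUnionCost(set_sizes):
--     import heapq
--     heapq.heapify(set_sizes)
--     min_sum = 0
--     while len(set_sizes) > 1:
--         s1 = heapq.heappop(set_sizes)
--         s2 = heapq.heappop(set_sizes)
--         c = s1 + s2
--         min_sum += c
--         heapq.heappush(set_sizes, c)
--
--     return min_sum
-- ===== SOURCE B (Python) =====
-- def _pop_min(q1, q2, i, j):
--     if i < len(q1) and (j >= len(q2) or q1[i] <= q2[j]):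
--         return q1[i], i + 1, j
--     return q2[j], i, j + 1
--
-- def minUnionCost(set_sizes):
--     q1 = sorted(set_sizes)
--     q2 = []
--     i = 0
--     j = 0
--     total = 0
--     while (len(q1) - i) + (len(q2) - j) > 1:
--         u, i, j = _pop_min(q1, q2, i, j)
--         v, i, j = _pop_min(q1, q2, i, j)
--         total += u + v
--         q2.append(u + v)
--     return total
-- ===== Notes on version B (the rewrite author's own statement) =====
-- stated objective: alternative
-- what changed: Replaces the heapq binary heap with a one-time sort followed by the classic two-queue Huffman merge (pop the smaller front of the sorted-originals queue or of the FIFO queue of merged sums); B reads a sorted copy and does not mutate set_sizes (A heapifies it in place), the proved equivalence is about the return value.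
import Mathlib
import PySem

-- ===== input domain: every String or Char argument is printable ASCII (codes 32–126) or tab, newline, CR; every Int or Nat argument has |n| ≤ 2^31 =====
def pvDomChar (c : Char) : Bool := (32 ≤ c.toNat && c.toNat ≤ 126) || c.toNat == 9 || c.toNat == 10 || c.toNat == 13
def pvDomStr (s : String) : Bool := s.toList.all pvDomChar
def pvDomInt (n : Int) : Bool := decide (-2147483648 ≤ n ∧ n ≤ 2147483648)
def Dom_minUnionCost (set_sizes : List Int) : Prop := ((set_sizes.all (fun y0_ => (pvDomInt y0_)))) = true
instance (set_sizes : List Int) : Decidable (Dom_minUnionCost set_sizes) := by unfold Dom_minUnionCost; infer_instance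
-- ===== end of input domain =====

-- B replaces A's binary heap with a one-time sort plus the two-queue merge (pop the smaller
-- front of the sorted originals / of the queue of merged sums). A mutates its argument in
-- place (heapify, then pops/pushes); B reads a sorted copy — the equivalence proved here is
-- about the return value only.

-- ===== PORT A =====
-- A's heap is modelled by the multiset of its elements: heapq.heappop returns the smallest
-- element (ported exactly as the library contract: take the minimum, remove one occurrence);
-- heapq.heapify reorders in place only (value-irrelevant here), heappush adds the element.
-- Fuel = length: each iteration shrinks the list by one.
def minUnionCostGo : Nat → List Int → Int → Int
  | 0, _, acc => acc
  | fuel+1, l, acc =>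
    if l.length ≤ 1 then acc
    else
      match PySem.List.min? l (fun x => x) with
      | none => acc
      | some s1 =>
        let l1 := l.erase s1
        match PySem.List.min? l1 (fun x => x) with
        | none => acc
        | some s2 =>
          minUnionCostGo fuel (l1.erase s2 ++ [s1 + s2]) (acc + (s1 + s2))

def minUnionCost (set_sizes : List Int) : Int :=
  minUnionCostGo set_sizes.length set_sizes 0

-- ===== PORT B =====
-- Source B's _pop_min: the two index-pointer queues become the two lists of not-yet-consumed
-- elements, q1[i:] and q2[j:]; same branch order, same popped value. The unreachable
-- both-empty case (the loop guarantees at least one element) gets a totality default.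
def minUnionCostPop (q1 q2 : List Int) : Int × List Int × List Int :=
  match q1, q2 with
  | a :: t1, [] => (a, t1, [])
  | a :: t1, b :: t2 => if a ≤ b then (a, t1, b :: t2) else (b, a :: t1, t2)
  | [], b :: t2 => (b, [], t2)
  | [], [] => (0, [], [])

-- Source B's while loop; q2.append goes to the back of the unconsumed part. Fuel = initial
-- length: each iteration removes two elements and appends one.
def minUnionCostAltGo : Nat → List Int → List Int → Int → Int
  | 0, _, _, acc => acc
  | fuel+1, q1, q2, acc =>
    if q1.length + q2.length ≤ 1 then acc
    else
      match minUnionCostPop q1 q2 with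
      | (u, q1', q2') =>
        match minUnionCostPop q1' q2' with
        | (v, q1'', q2'') =>
          minUnionCostAltGo fuel q1'' (q2'' ++ [u + v]) (acc + (u + v))

def minUnionCost_alt (set_sizes : List Int) : Int :=
  minUnionCostAltGo set_sizes.length (PySem.List.sorted set_sizes (fun x => x)) [] 0

-- ===== PRECONDITION & SPEC =====
def Spec_minUnionCost (set_sizes : List Int) (out : Int) : Prop := out = minUnionCost_alt set_sizes
instance (set_sizes : List Int) (out : Int) : Decidable (Spec_minUnionCost set_sizes out) := by unfold Spec_minUnionCost; infer_instance

-- ===== CLAIM (what is proved, stated in full; the proofs are below) =====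
def Claim_equal_minUnionCost : Prop := ∀ (set_sizes : List Int), Dom_minUnionCost set_sizes → Spec_minUnionCost set_sizes (minUnionCost set_sizes)

-- ===== LEMMAS AND PROOFS =====

-- Python's min of a multiset: if l is a permutation of m :: rest with m a lower bound of
-- rest, then min? returns (an element of value) m.
theorem min_value_eq {l rest : List Int} {m : Int} (hp : l.Perm (m :: rest))
    (hb : ∀ z ∈ rest, m ≤ z) {m' : Int}
    (hm : PySem.List.min? l (fun x => x) = some m') : m' = m := by
  have hmem : m' ∈ m :: rest := hp.mem_iff.mp (PySem.List.min?_mem hm)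
  have h1 : m' ≤ m := PySem.List.min?_isMin hm m (hp.mem_iff.mpr (by simp))
  rcases List.mem_cons.mp hmem with h | h
  · exact h
  · exact le_antisymm h1 (hb m' h)

-- In a ≤-sorted list every element is ≤ the last one.
theorem le_of_mem_getLast? : ∀ {l : List Int} {t : Int}, l.Pairwise (· ≤ ·) →
    l.getLast? = some t → ∀ z ∈ l, z ≤ t := by
  intro l
  induction l with
  | nil => intro t _ h; simp at h
  | cons a l ih =>
    intro t hs hl z hz
    rcases List.pairwise_cons.mp hs with ⟨ha, hs'⟩
    cases l with
    | nil =>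
      simp at hl hz
      omega
    | cons b l' =>
      rw [List.getLast?_cons_cons] at hl
      rcases List.mem_cons.mp hz with h | h
      · subst h
        exact ha t (List.mem_of_getLast? hl)
      · exact ih hs' hl z h

-- What one _pop_min does, given both queues sorted: it pops a minimum; the queues stay
-- sorted; any lower bound y of q1 and of all-but-the-last of q2 still bounds the popped
-- value and the remainders whenever the last of q2 survives (then the last also survives).
theorem pop_spec {q1 q2 : List Int} (hlen : 1 ≤ q1.length + q2.length)
    (h1 : q1.Pairwise (· ≤ ·)) (h2 : q2.Pairwise (· ≤ ·)) :
    ∃ m q1' q2', minUnionCostPop q1 q2 = (m, q1', q2') ∧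
      (q1 ++ q2).Perm (m :: (q1' ++ q2')) ∧
      (∀ z ∈ q1' ++ q2', m ≤ z) ∧
      q1'.Pairwise (· ≤ ·) ∧ q2'.Pairwise (· ≤ ·) ∧
      (∀ y, (∀ z ∈ q1, y ≤ z) → (∀ z ∈ q2.dropLast, y ≤ z) → q2' ≠ [] →
        (y ≤ m ∧ (∀ z ∈ q1', y ≤ z) ∧ (∀ z ∈ q2'.dropLast, y ≤ z) ∧
          q2'.getLast? = q2.getLast?)) := by
  match q1, q2 with
  | [], [] => simp at hlen
  | a :: t1, [] =>
    refine ⟨a, t1, [], rfl, by simp, ?_, (List.pairwise_cons.mp h1).2, h2, ?_⟩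
    · intro z hz
      simp at hz
      exact (List.pairwise_cons.mp h1).1 z hz
    · intro y hy1 _ hne
      exact absurd rfl hne
  | [], b :: t2 =>
    refine ⟨b, [], t2, rfl, by simp, ?_, h1, (List.pairwise_cons.mp h2).2, ?_⟩
    · intro z hz
      simp at hz
      exact (List.pairwise_cons.mp h2).1 z hz
    · intro y _ hy2 hne
      refine ⟨?_, by simp, ?_, ?_⟩
      · exact hy2 b (by rw [List.dropLast_cons_of_ne_nil hne]; simp)
      · intro z hz
        exact hy2 z (by rw [List.dropLast_cons_of_ne_nil hne]; simp [hz])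
      · cases t2 with
        | nil => exact absurd rfl hne
        | cons c t2' => rw [List.getLast?_cons_cons]
  | a :: t1, b :: t2 =>
    rcases List.pairwise_cons.mp h1 with ⟨ha, h1'⟩
    rcases List.pairwise_cons.mp h2 with ⟨hb, h2'⟩
    by_cases hab : a ≤ b
    · refine ⟨a, t1, b :: t2, by simp [minUnionCostPop, hab], by simp, ?_, h1', h2, ?_⟩
      · intro z hz
        rcases List.mem_append.mp hz with h | h
        · exact ha z h
        · rcases List.mem_cons.mp h with h | h
          · omega
          · have := hb z h; omega
      · intro y hy1 hy2 _
        exact ⟨hy1 a (by simp), fun z hz => hy1 z (by simp [hz]), hy2, rfl⟩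
    · refine ⟨b, a :: t1, t2, by simp [minUnionCostPop, hab], ?_, ?_, h1, h2', ?_⟩
      · exact List.perm_middle
      · intro z hz
        rcases List.mem_append.mp hz with h | h
        · rcases List.mem_cons.mp h with h | h
          · omega
          · have := ha z h; omega
        · exact hb z h
      · intro y hy1 hy2 hne
        refine ⟨?_, hy1, ?_, ?_⟩
        · exact hy2 b (by rw [List.dropLast_cons_of_ne_nil hne]; simp)
        · intro z hz
          exact hy2 z (by rw [List.dropLast_cons_of_ne_nil hne]; simp [hz])
        · cases t2 with
          | nil => exact absurd rfl hne
          | cons c t2' => rw [List.getLast?_cons_cons]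

-- Main simulation: A's multiset loop equals B's two-queue loop, under the two-queue
-- invariant (both queues sorted; if the merged queue is nonempty, some y bounds everything
-- except its last element, which is ≤ 2y).
theorem go_eq (n : Nat) : ∀ (l q1 q2 : List Int) (acc : Int), l.length ≤ n →
    l.Perm (q1 ++ q2) → q1.Pairwise (· ≤ ·) → q2.Pairwise (· ≤ ·) →
    (q2 ≠ [] → ∃ y, (∀ z ∈ q1, y ≤ z) ∧ (∀ z ∈ q2.dropLast, y ≤ z) ∧
      (∀ t, q2.getLast? = some t → t ≤ 2 * y)) →
    minUnionCostGo n l acc = minUnionCostAltGo n q1 q2 acc := by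
  induction n with
  | zero => intro l q1 q2 acc _ _ _ _ _; rfl
  | succ n ih =>
    intro l q1 q2 acc hn hp h1 h2 hinv
    have hlen : (q1 ++ q2).length = l.length := hp.length_eq.symm
    simp only [List.length_append] at hlen
    by_cases hsmall : l.length ≤ 1
    · rw [minUnionCostGo, minUnionCostAltGo]
      simp only [hsmall, if_true]
      have : q1.length + q2.length ≤ 1 := by omega
      simp only [this, if_true]
    · -- at least two elements
      have hge2 : 2 ≤ q1.length + q2.length := by omega
      obtain ⟨u, q1', q2', hpop1, hperm1, hmin1, h1', h2', hy1⟩ :=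
        pop_spec (q1 := q1) (q2 := q2) (by omega) h1 h2
      have hlen1 : q1'.length + q2'.length + 1 = q1.length + q2.length := by
        have := hperm1.length_eq
        simp at this
        omega
      obtain ⟨v, q1'', q2'', hpop2, hperm2, hmin2, h1'', h2'', hy2⟩ :=
        pop_spec (q1 := q1') (q2 := q2') (by omega) h1' h2'
      -- A pops the same two values
      have hpl : l.Perm (u :: (q1' ++ q2')) := hp.trans hperm1
      obtain ⟨s1, hs1⟩ : ∃ m, PySem.List.min? l (fun x => x) = some m := by
        cases h : PySem.List.min? l (fun x => x) with
        | none =>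
            have : l = [] := (PySem.List.min?_eq_none_iff _ _).mp h
            subst this; simp at hsmall
        | some m => exact ⟨m, rfl⟩
      rw [min_value_eq hpl hmin1 hs1] at hs1
      have hpe1 : (l.erase u).Perm (q1' ++ q2') := by
        have := hpl.erase u
        simpa using this
      have hpl2 : (l.erase u).Perm (v :: (q1'' ++ q2'')) := hpe1.trans hperm2
      obtain ⟨s2, hs2⟩ : ∃ m, PySem.List.min? (l.erase u) (fun x => x) = some m := by
        cases h : PySem.List.min? (l.erase u) (fun x => x) with
        | none =>
            have h0 : l.erase u = [] := (PySem.List.min?_eq_none_iff _ _).mp h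
            have := hpe1.length_eq
            rw [h0] at this
            simp at this
            omega
        | some m => exact ⟨m, rfl⟩
      rw [min_value_eq hpl2 hmin2 hs2] at hs2
      have hpe2 : ((l.erase u).erase v).Perm (q1'' ++ q2'') := by
        have := hpl2.erase v
        simpa using this
      -- u ≤ v
      have hvmem : v ∈ q1' ++ q2' := hperm2.mem_iff.mpr (by simp)
      have huv : u ≤ v := hmin1 v hvmem
      -- the new merged queue is sorted
      have hlast : ∀ z ∈ q2'', z ≤ u + v := by
        intro z hz
        have hne'' : q2'' ≠ [] := by intro h; rw [h] at hz; simp at hz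
        have hne' : q2' ≠ [] := by
          -- q2'' comes from popping (q1', q2'); if q2' = [] then q2'' = []
          intro h
          rw [h] at hpop2
          cases q1' with
          | nil =>
            simp [minUnionCostPop] at hpop2
            exact hne'' hpop2.2.2
          | cons a t1 =>
            simp [minUnionCostPop] at hpop2
            exact hne'' hpop2.2.2
        have hne : q2 ≠ [] := by
          -- likewise q2' comes from popping (q1, q2): if q2 = [] then q2' = []
          intro h
          rw [h] at hpop1
          cases q1 with
          | nil =>
            simp [minUnionCostPop] at hpop1
            exact hne' hpop1.2.2
          | cons a t1 =>
            simp [minUnionCostPop] at hpop1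
            exact hne' hpop1.2.2
        obtain ⟨y, hyq1, hyq2, hyt⟩ := hinv hne
        obtain ⟨hyu, hyq1', hyq2', hlast1⟩ := hy1 y hyq1 hyq2 hne'
        obtain ⟨hyv, hyq1'', hyq2'', hlast2⟩ := hy2 y hyq1' hyq2' hne''
        obtain ⟨t, ht⟩ : ∃ t, q2.getLast? = some t := by
          cases h : q2.getLast? with
          | none => exact absurd (List.getLast?_eq_none_iff.mp h) hne
          | some t => exact ⟨t, rfl⟩
        have hzt : z ≤ t := le_of_mem_getLast? h2'' (by rw [hlast2, hlast1]; exact ht) z hz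
        have := hyt t ht
        omega
      have hsorted'' : (q2'' ++ [u + v]).Pairwise (· ≤ ·) := by
        rw [List.pairwise_append]
        exact ⟨h2'', by simp, by intro z hz w hw; simp at hw; subst hw; exact hlast z hz⟩
      -- the new invariant, with bound v
      have hinv' : (q2'' ++ [u + v]) ≠ [] → ∃ y, (∀ z ∈ q1'', y ≤ z) ∧
          (∀ z ∈ (q2'' ++ [u + v]).dropLast, y ≤ z) ∧
          (∀ t, (q2'' ++ [u + v]).getLast? = some t → t ≤ 2 * y) := by
        intro _
        refine ⟨v, fun z hz => hmin2 z (by simp [hz]), ?_, ?_⟩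
        · rw [List.dropLast_concat]
          intro z hz
          exact hmin2 z (by simp [hz])
        · intro t ht
          rw [List.getLast?_concat] at ht
          injection ht with hteq
          omega
      -- lengths
      have hul : u ∈ l := hpl.mem_iff.mpr (by simp)
      have hvl : v ∈ l.erase u := hpl2.mem_iff.mpr (by simp)
      have hllen : ((l.erase u).erase v ++ [u + v]).length ≤ n := by
        have e1 : (l.erase u).length = l.length - 1 := List.length_erase_of_mem hul
        have e2 : ((l.erase u).erase v).length = (l.erase u).length - 1 :=
          List.length_erase_of_mem hvl
        simp only [List.length_append, List.length_cons, List.length_nil]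
        omega
      -- step and recurse
      rw [minUnionCostGo, minUnionCostAltGo]
      simp only [hsmall, if_false, hs1, hs2, hpop1, hpop2,
        show ¬ (q1.length + q2.length ≤ 1) by omega, if_false]
      exact ih _ _ _ _ hllen
        (by
          have : ((l.erase u).erase v ++ [u + v]).Perm ((q1'' ++ q2'') ++ [u + v]) :=
            hpe2.append_right [u + v]
          simpa [List.append_assoc] using this)
        h1'' hsorted'' hinv'

-- ===== VERDICT (by name: the statement is the Claim_ definition above) =====
theorem minUnionCost_spec : Claim_equal_minUnionCost := by
  intro l _
  unfold Spec_minUnionCost minUnionCost minUnionCost_alt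
  refine go_eq l.length l (PySem.List.sorted l (fun x => x)) [] 0 le_rfl ?_ ?_ (by simp)
    (by intro h; exact absurd rfl h)
  · simpa using (PySem.List.sorted_perm l (fun x => x) false).symm
  · exact PySem.List.sorted_pairwise (xs := l) (key := fun x => x)
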